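-- pv_equiv track=rewrite | github.com/stvsever/ThesisMaster | Evaluation/01_pseudoprofile(s)/time_series_data/visualize_time_series.py | code_color_map
-- ===== SOURCE A (Python) =====
-- from typing import Dict, List, Tuple
--
-- OKABE_ITO = {
--     "black": "#000000",
--     "orange": "#E69F00",
--     "sky": "#56B4E9",
--     "green": "#009E73",
--     "yellow": "#F0E442",
--     "blue": "#0072B2",
--     "vermillion": "#D55E00",
--     "purple": "#CC79A7",
--     "gray": "#7F7F7F",
-- }
--
-- def code_color_map(codes: List[str], role_map: Dict[str, str]) -> Dict[str, str]:
--     pred_colors = [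
--         OKABE_ITO["blue"],
--         OKABE_ITO["sky"],
--         OKABE_ITO["green"],
--         OKABE_ITO["orange"],
--         OKABE_ITO["purple"],
--         OKABE_ITO["vermillion"],
--         OKABE_ITO["yellow"],
--         OKABE_ITO["gray"],
--     ]
--     out: Dict[str, str] = {}
--
--     preds = [c for c in codes if role_map.get(c, "").upper() == "PREDICTOR"]
--     crits = [c for c in codes if role_map.get(c, "").upper() == "CRITERION"]
--
--     for i, c in enumerate(preds):
--         out[c] = pred_colors[i % len(pred_colors)]
--     for c in crits:
--         out[c] = OKABE_ITO["black"]
--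
--     # unknowns
--     unknowns = [c for c in codes if c not in out]
--     for c in unknowns:
--         out[c] = OKABE_ITO["gray"]
--
--     return out
-- ===== SOURCE B (Python) =====
-- from typing import Dict, List
--
-- OKABE_ITO = {
--     "black": "#000000",
--     "orange": "#E69F00",
--     "sky": "#56B4E9",
--     "green": "#009E73",
--     "yellow": "#F0E442",
--     "blue": "#0072B2",
--     "vermillion": "#D55E00",
--     "purple": "#CC79A7",
--     "gray": "#7F7F7F",
-- }
--
-- def code_color_map(codes: List[str], role_map: Dict[str, str]) -> Dict[str, str]:
--     # Single pass over codes: classify each code once, keeping one running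
--     # predictor counter; the three groups are merged at the end so the
--     # insertion order (predictors, criteria, unknowns) is preserved.
--     pred_colors = [
--         OKABE_ITO["blue"],
--         OKABE_ITO["sky"],
--         OKABE_ITO["green"],
--         OKABE_ITO["orange"],
--         OKABE_ITO["purple"],
--         OKABE_ITO["vermillion"],
--         OKABE_ITO["yellow"],
--         OKABE_ITO["gray"],
--     ]
--     preds: Dict[str, str] = {}
--     crits: Dict[str, str] = {}
--     unknowns: Dict[str, str] = {}
--     i = 0
--     for c in codes:
--         role = role_map.get(c, "").upper()
--         if role == "PREDICTOR":
--             preds[c] = pred_colors[i % len(pred_colors)]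
--             i += 1
--         elif role == "CRITERION":
--             crits[c] = OKABE_ITO["black"]
--         else:
--             unknowns[c] = OKABE_ITO["gray"]
--     return {**preds, **crits, **unknowns}
-- ===== Notes on version B (the rewrite author's own statement) =====
-- stated objective: alternative
-- what changed: B replaces A's three filtering comprehensions plus three separate insertion loops (six traversals of codes) by a single classifying pass over codes that maintains one running predictor counter and three per-role dicts, merged once at the end.
import Mathlib
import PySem

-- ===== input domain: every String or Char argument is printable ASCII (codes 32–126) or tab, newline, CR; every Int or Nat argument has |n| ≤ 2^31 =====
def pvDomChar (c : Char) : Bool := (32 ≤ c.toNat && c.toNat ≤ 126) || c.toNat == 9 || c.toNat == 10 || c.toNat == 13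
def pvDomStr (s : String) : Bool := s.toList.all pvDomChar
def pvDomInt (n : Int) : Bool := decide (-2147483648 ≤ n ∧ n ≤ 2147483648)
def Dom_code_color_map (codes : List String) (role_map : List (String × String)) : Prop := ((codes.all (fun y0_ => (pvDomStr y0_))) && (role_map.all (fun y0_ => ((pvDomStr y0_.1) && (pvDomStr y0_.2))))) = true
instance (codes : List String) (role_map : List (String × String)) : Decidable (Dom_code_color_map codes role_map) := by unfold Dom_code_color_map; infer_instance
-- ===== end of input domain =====

-- B replaces A's three filtering passes plus three insertion loops by a single
-- classifying pass over `codes` (one running predictor counter, three group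
-- dicts merged at the end); same return value, different decomposition.

-- ===== PORT A =====
def code_color_map (codes : List String) (role_map : List (String × String)) : List (String × String) :=
  let rd : PySem.Dict String String := PySem.Dict.mk role_map
  let pred_colors : List String :=
    ["#0072B2", "#56B4E9", "#009E73", "#E69F00", "#CC79A7", "#D55E00", "#F0E442", "#7F7F7F"]
  let out0 : PySem.Dict String String := PySem.Dict.empty
  let preds := codes.filter (fun c => PySem.Str.upper (rd.getD c "") == "PREDICTOR")
  let crits := codes.filter (fun c => PySem.Str.upper (rd.getD c "") == "CRITERION")
  let out1 := (PySem.List.enumerate preds 0).foldl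
    (fun out ic =>
      out.insert ic.2 (PySem.List.pyGetD pred_colors (PySem.Int.mod ic.1 (pred_colors.length : Int)) ""))
    out0
  let out2 := crits.foldl (fun out c => out.insert c "#000000") out1
  let unknowns := codes.filter (fun c => !(out2.contains c))
  let out3 := unknowns.foldl (fun out c => out.insert c "#7F7F7F") out2
  out3.items

-- ===== PORT B =====
def code_color_map_alt (codes : List String) (role_map : List (String × String)) : List (String × String) :=
  let rd : PySem.Dict String String := PySem.Dict.mk role_map
  let pred_colors : List String :=
    ["#0072B2", "#56B4E9", "#009E73", "#E69F00", "#CC79A7", "#D55E00", "#F0E442", "#7F7F7F"]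
  let st := codes.foldl
    (fun (st : PySem.Dict String String × PySem.Dict String String × PySem.Dict String String × Int) c =>
      if PySem.Str.upper (rd.getD c "") == "PREDICTOR" then
        (st.1.insert c (PySem.List.pyGetD pred_colors (PySem.Int.mod st.2.2.2 (pred_colors.length : Int)) ""),
         st.2.1, st.2.2.1, st.2.2.2 + 1)
      else if PySem.Str.upper (rd.getD c "") == "CRITERION" then
        (st.1, st.2.1.insert c "#000000", st.2.2.1, st.2.2.2)
      else
        (st.1, st.2.1, st.2.2.1.insert c "#7F7F7F", st.2.2.2))
    (PySem.Dict.empty, PySem.Dict.empty, PySem.Dict.empty, 0)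
  let merged := st.2.2.1.items.foldl (fun d p => d.insert p.1 p.2)
    (st.2.1.items.foldl (fun d p => d.insert p.1 p.2) st.1)
  merged.items

-- ===== PRECONDITION & SPEC =====
def Spec_code_color_map (codes : List String) (role_map : List (String × String)) (out : List (String × String)) : Prop := out = code_color_map_alt codes role_map
instance (codes : List String) (role_map : List (String × String)) (out : List (String × String)) : Decidable (Spec_code_color_map codes role_map out) := by unfold Spec_code_color_map; infer_instance

-- ===== CLAIM (what is proved, stated in full; the proofs are below) =====
def Claim_equal_code_color_map : Prop := ∀ (codes : List String) (role_map : List (String × String)), Dom_code_color_map codes role_map → Spec_code_color_map codes role_map (code_color_map codes role_map)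

-- ===== LEMMAS AND PROOFS =====

-- A's first loop: fold over `enumerate preds` with insert, as structural recursion.
def predLoop (g : Int → String) : List String → PySem.Dict String String → Int → PySem.Dict String String
  | [], d, _ => d
  | c :: cs, d, i => predLoop g cs (d.insert c (g i)) (i + 1)

-- A's second/third loops: insert a constant value for every element.
def constLoop (v : String) (l : List String) (d : PySem.Dict String String) : PySem.Dict String String :=
  l.foldl (fun d c => d.insert c v) d

lemma enumerate_foldl_eq_predLoop (g : Int → String) :
    ∀ (l : List String) (d : PySem.Dict String String) (i : Int),
      (PySem.List.enumerate l i).foldl (fun out ic => out.insert ic.2 (g ic.1)) d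
        = predLoop g l d i := by
  intro l
  induction l with
  | nil => intro d i; simp [PySem.List.enumerate_nil, predLoop]
  | cons c cs ih =>
      intro d i
      simp [PySem.List.enumerate_cons, predLoop, ih]

lemma keys_constLoop (v : String) (l : List String) (d : PySem.Dict String String) :
    (constLoop v l d).keys = PySem.Set.update d.keys l :=
  PySem.Dict.keys_foldl_insert l (fun _ _ => v) d

lemma nodup_keys_constLoop (v : String) (l : List String) (d : PySem.Dict String String)
    (h : d.keys.Nodup) : (constLoop v l d).keys.Nodup :=
  PySem.Dict.nodup_keys_foldl_insert l (fun _ _ => v) d h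

lemma mem_keys_predLoop (g : Int → String) :
    ∀ (l : List String) (d : PySem.Dict String String) (i : Int) (c : String),
      c ∈ (predLoop g l d i).keys ↔ c ∈ d.keys ∨ c ∈ l := by
  intro l
  induction l with
  | nil => intro d i c; simp [predLoop]
  | cons x xs ih =>
      intro d i c
      simp [predLoop, ih, PySem.Dict.mem_keys_insert]
      tauto

lemma constLoop_def (v : String) (l : List String) (d : PySem.Dict String String) :
    l.foldl (fun d c => d.insert c v) d = constLoop v l d := rfl

lemma insert_mk_append (xs ys : List (String × String)) (c v : String)
    (h : ∀ p ∈ xs, (p.1 == c) = false) :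
    ((PySem.Dict.mk (xs ++ ys)).insert c v).items
      = xs ++ ((PySem.Dict.mk ys).insert c v).items := by
  have hany : xs.any (fun p => p.1 == c) = false := by
    simp only [List.any_eq_false]
    intro p hp; simp [h p hp]
  have hmap : xs.map (fun p => if p.1 = c then (c, v) else p) = xs := by
    rw [List.map_congr_left (g := id), List.map_id]
    intro p hp
    have := h p hp; simp only [beq_eq_false_iff_ne, ne_eq] at this
    simp [this]
  simp only [PySem.Dict.insert, PySem.Dict.contains, List.any_append, hany,
    Bool.false_or]
  by_cases hc : ys.any (fun p => p.1 == c) = true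
  · simp [hc, List.map_append, hmap]
  · simp only [Bool.not_eq_true] at hc
    simp [hc, List.append_assoc]

lemma constLoop_mk_append (v : String) :
    ∀ (l : List String) (xs : List (String × String)) (d : PySem.Dict String String),
      (∀ c ∈ l, ∀ p ∈ xs, (p.1 == c) = false) →
      (constLoop v l (PySem.Dict.mk (xs ++ d.items))).items
        = xs ++ (constLoop v l d).items := by
  intro l
  induction l with
  | nil => intro xs d h; simp [constLoop]
  | cons c cs ih =>
      intro xs d h
      have h1 : ∀ p ∈ xs, (p.1 == c) = false := fun p hp => h c (by simp) p hp
      have hins : (PySem.Dict.mk (xs ++ d.items)).insert c v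
          = PySem.Dict.mk (xs ++ (d.insert c v).items) := by
        apply PySem.Dict.ext
        have := insert_mk_append xs d.items c v h1
        simpa using this
      simp only [constLoop, List.foldl_cons, hins]
      exact ih xs (d.insert c v) (fun c' hc' p hp => h c' (by simp [hc']) p hp)

lemma constLoop_items (v : String) (l : List String) (d : PySem.Dict String String)
    (h : ∀ c ∈ l, d.contains c = false) :
    (constLoop v l d).items = d.items ++ (constLoop v l PySem.Dict.empty).items := by
  have h1 : ∀ c ∈ l, ∀ p ∈ d.items, (p.1 == c) = false := by
    intro c hc p hp
    have := h c hc
    simp only [PySem.Dict.contains, List.any_eq_false] at this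
    simpa using this p hp
  have h2 := constLoop_mk_append v l d.items PySem.Dict.empty h1
  have h3 : PySem.Dict.mk (d.items ++ PySem.Dict.empty.items) = d := by
    apply PySem.Dict.ext; simp [PySem.Dict.empty]
  rw [h3] at h2
  exact h2

-- B's single pass splits into the three per-role loops over the filtered lists.
lemma foldl_step_split (p q : String → Bool) (g : Int → String) (v1 v2 : String)
    (hpq : ∀ c, p c = true → q c = false) :
    ∀ (l : List String) (dp dc du : PySem.Dict String String) (i : Int),
      l.foldl
        (fun (st : PySem.Dict String String × PySem.Dict String String × PySem.Dict String String × Int) c =>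
          if p c then (st.1.insert c (g st.2.2.2), st.2.1, st.2.2.1, st.2.2.2 + 1)
          else if q c then (st.1, st.2.1.insert c v1, st.2.2.1, st.2.2.2)
          else (st.1, st.2.1, st.2.2.1.insert c v2, st.2.2.2))
        (dp, dc, du, i)
      = (predLoop g (l.filter p) dp i,
         constLoop v1 (l.filter q) dc,
         constLoop v2 (l.filter (fun c => !(p c) && !(q c))) du,
         i + ((l.filter p).length : Int)) := by
  intro l
  induction l with
  | nil => intro dp dc du i; simp [predLoop, constLoop]
  | cons c cs ih =>
      intro dp dc du i
      by_cases hp : p c = true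
      · have hq := hpq c hp
        simp only [List.foldl_cons, hp, if_true, List.filter_cons, hq, ih, predLoop]
        simp
        omega
      · simp only [Bool.not_eq_true] at hp
        by_cases hq : q c = true
        · simp only [List.foldl_cons, hp, hq, if_true, Bool.false_eq_true, if_false,
            List.filter_cons, ih, constLoop]
          simp
        · simp only [Bool.not_eq_true] at hq
          simp only [List.foldl_cons, hp, hq, Bool.false_eq_true, if_false,
            List.filter_cons, ih, constLoop]
          simp

-- ===== VERDICT (by name: the statement is the Claim_ definition above) =====
theorem code_color_map_spec : Claim_equal_code_color_map := by
  intro codes role_map _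
  unfold Spec_code_color_map
  unfold code_color_map code_color_map_alt
  simp only []
  have hpq : ∀ c : String, (PySem.Str.upper ((PySem.Dict.mk role_map).getD c "") == "PREDICTOR") = true →
      (PySem.Str.upper ((PySem.Dict.mk role_map).getD c "") == "CRITERION") = false := by
    intro c h
    rw [eq_of_beq h]; decide
  have hqp : ∀ c : String, (PySem.Str.upper ((PySem.Dict.mk role_map).getD c "") == "CRITERION") = true →
      (PySem.Str.upper ((PySem.Dict.mk role_map).getD c "") == "PREDICTOR") = false := by
    intro c h
    rw [eq_of_beq h]; decide
  rw [foldl_step_split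
        (fun c => PySem.Str.upper ((PySem.Dict.mk role_map).getD c "") == "PREDICTOR")
        (fun c => PySem.Str.upper ((PySem.Dict.mk role_map).getD c "") == "CRITERION")
        (fun i => PySem.List.pyGetD
            ["#0072B2", "#56B4E9", "#009E73", "#E69F00", "#CC79A7", "#D55E00", "#F0E442", "#7F7F7F"]
            (PySem.Int.mod i (↑(List.length ["#0072B2", "#56B4E9", "#009E73", "#E69F00", "#CC79A7", "#D55E00", "#F0E442", "#7F7F7F"]))) "")
        "#000000" "#7F7F7F" hpq codes PySem.Dict.empty PySem.Dict.empty PySem.Dict.empty 0]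
  simp only []
  rw [enumerate_foldl_eq_predLoop
        (fun i => PySem.List.pyGetD
            ["#0072B2", "#56B4E9", "#009E73", "#E69F00", "#CC79A7", "#D55E00", "#F0E442", "#7F7F7F"]
            (PySem.Int.mod i (↑(List.length ["#0072B2", "#56B4E9", "#009E73", "#E69F00", "#CC79A7", "#D55E00", "#F0E442", "#7F7F7F"]))) "")
        (List.filter (fun c => PySem.Str.upper ((PySem.Dict.mk role_map).getD c "") == "PREDICTOR") codes)
        PySem.Dict.empty 0]
  simp only [constLoop_def]
  set P : String → Bool := fun c => PySem.Str.upper ((PySem.Dict.mk role_map).getD c "") == "PREDICTOR" with hP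
  set Q : String → Bool := fun c => PySem.Str.upper ((PySem.Dict.mk role_map).getD c "") == "CRITERION" with hQ
  set g : Int → String := fun i => PySem.List.pyGetD
      ["#0072B2", "#56B4E9", "#009E73", "#E69F00", "#CC79A7", "#D55E00", "#F0E442", "#7F7F7F"]
      (PySem.Int.mod i (↑(List.length ["#0072B2", "#56B4E9", "#009E73", "#E69F00", "#CC79A7", "#D55E00", "#F0E442", "#7F7F7F"]))) "" with hg
  set dp : PySem.Dict String String := predLoop g (codes.filter P) PySem.Dict.empty 0 with hdp
  set dcE : PySem.Dict String String := constLoop "#000000" (codes.filter Q) PySem.Dict.empty with hdcE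
  set out2 : PySem.Dict String String := constLoop "#000000" (codes.filter Q) dp with hout2
  have hPQ : ∀ c, P c = true → Q c = false := hpq
  have hQP : ∀ c, Q c = true → P c = false := hqp
  -- membership characterizations
  have hcontf : ∀ (d : PySem.Dict String String) (c : String), c ∉ d.keys → d.contains c = false := by
    intro d c h
    rw [PySem.Dict.contains_eq_decide_mem_keys]
    exact decide_eq_false h
  have hdpk : ∀ c : String, c ∈ dp.keys ↔ P c = true ∧ c ∈ codes := by
    intro c
    rw [hdp, mem_keys_predLoop]
    simp [List.mem_filter, PySem.Dict.keys_empty, and_comm]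
  have hdcEk : ∀ c : String, c ∈ dcE.keys ↔ Q c = true ∧ c ∈ codes := by
    intro c
    rw [hdcE, keys_constLoop]
    rw [PySem.Set.mem_update]
    simp [List.mem_filter, PySem.Dict.keys_empty, and_comm]
  have hout2k : ∀ c : String, c ∈ out2.keys ↔ (P c = true ∨ Q c = true) ∧ c ∈ codes := by
    intro c
    rw [hout2, keys_constLoop, PySem.Set.mem_update, hdpk]
    simp [List.mem_filter]
    tauto
  -- A side step 1: crits are fresh in dp
  have hA1 : ∀ c ∈ codes.filter Q, dp.contains c = false := by
    intro c hc
    rw [List.mem_filter] at hc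
    apply hcontf
    rw [hdpk]
    rintro ⟨hp1, -⟩
    rw [hQP c hc.2] at hp1
    exact absurd hp1 (by simp)
  -- unknowns are exactly the non-pred non-crit codes
  have hA2 : ∀ c ∈ codes, (!(out2.contains c)) = (!(P c) && !(Q c)) := by
    intro c hc
    by_cases hp1 : P c = true
    · have : out2.contains c = true := by
        rw [PySem.Dict.contains_eq_decide_mem_keys, decide_eq_true_eq, hout2k]
        exact ⟨Or.inl hp1, hc⟩
      simp [this, hp1]
    · by_cases hq1 : Q c = true
      · have : out2.contains c = true := by
          rw [PySem.Dict.contains_eq_decide_mem_keys, decide_eq_true_eq, hout2k]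
          exact ⟨Or.inr hq1, hc⟩
        simp [this, hq1]
      · have : out2.contains c = false := by
          apply hcontf
          rw [hout2k]
          rintro ⟨hor, -⟩
          rcases hor with h | h
          · exact hp1 h
          · exact hq1 h
        simp [this, hp1, hq1]
  rw [List.filter_congr hA2]
  -- A side: unknown codes are fresh in out2
  have hA3 : ∀ c ∈ codes.filter (fun c => !(P c) && !(Q c)), out2.contains c = false := by
    intro c hc
    rw [List.mem_filter] at hc
    apply hcontf
    rw [hout2k]
    rintro ⟨hor, -⟩
    rcases hc with ⟨-, hrc⟩
    simp only [Bool.and_eq_true, Bool.not_eq_true'] at hrc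
    rcases hor with h | h
    · rw [hrc.1] at h; exact absurd h (by simp)
    · rw [hrc.2] at h; exact absurd h (by simp)
  rw [constLoop_items "#7F7F7F" _ _ hA3]
  rw [hout2, constLoop_items "#000000" _ _ hA1]
  -- B side: fold the unknown-filter into P/Q form, then the two merges append
  have hflt : (List.filter (fun c =>
        !(PySem.Str.upper ((PySem.Dict.mk role_map).getD c "") == "PREDICTOR") &&
        !(PySem.Str.upper ((PySem.Dict.mk role_map).getD c "") == "CRITERION")) codes)
      = List.filter (fun c => !(P c) && !(Q c)) codes := rfl
  rw [hflt]
  set duE : PySem.Dict String String := constLoop "#7F7F7F" (codes.filter (fun c => !(P c) && !(Q c))) PySem.Dict.empty with hduE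
  have hduEk : ∀ c : String, c ∈ duE.keys ↔ (!(P c) && !(Q c)) = true ∧ c ∈ codes := by
    intro c
    rw [hduE, keys_constLoop, PySem.Set.mem_update]
    simp [List.mem_filter, PySem.Dict.keys_empty, and_comm]
  have hfresh1 : ∀ a ∈ dcE.items, dp.contains a.1 = false := by
    intro a ha
    have hk : a.1 ∈ dcE.keys := PySem.Dict.mem_keys_of_mem_items _ ha
    rw [hdcEk] at hk
    apply hcontf
    rw [hdpk]
    rintro ⟨hp1, -⟩
    rw [hQP _ hk.1] at hp1
    exact absurd hp1 (by simp)
  have hnodup1 : (dcE.items.map (fun p => p.1)).Nodup := by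
    exact nodup_keys_constLoop _ _ _ PySem.Dict.nodup_keys_empty
  have hB1 : List.foldl (fun d p => d.insert p.1 p.2) dp dcE.items
      = PySem.Dict.mk (dp.items ++ dcE.items) := by
    apply PySem.Dict.ext
    rw [PySem.Dict.items_foldl_insert_fresh dcE.items (fun p => p.1) (fun p => p.2) dp hfresh1 hnodup1]
    simp
  rw [hB1]
  have hfresh2 : ∀ a ∈ duE.items, (PySem.Dict.mk (dp.items ++ dcE.items)).contains a.1 = false := by
    intro a ha
    have hk : a.1 ∈ duE.keys := PySem.Dict.mem_keys_of_mem_items _ ha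
    rw [hduEk] at hk
    obtain ⟨hr, -⟩ := hk
    simp only [Bool.and_eq_true, Bool.not_eq_true'] at hr
    apply hcontf
    simp only [PySem.Dict.keys, List.map_append, List.mem_append]
    rintro (h | h)
    · have : a.1 ∈ dp.keys := h
      rw [hdpk] at this
      rw [hr.1] at this
      exact absurd this.1 (by simp)
    · have : a.1 ∈ dcE.keys := h
      rw [hdcEk] at this
      rw [hr.2] at this
      exact absurd this.1 (by simp)
  have hnodup2 : (duE.items.map (fun p => p.1)).Nodup := by
    exact nodup_keys_constLoop _ _ _ PySem.Dict.nodup_keys_empty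
  rw [PySem.Dict.items_foldl_insert_fresh duE.items (fun p => p.1) (fun p => p.2)
        (PySem.Dict.mk (dp.items ++ dcE.items)) hfresh2 hnodup2]
  simp [hdcE]
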